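-- pv_equiv track=rewrite | github.com/bashtavenko/py_snippets | arrays/largest/segment/square.py | largest_square_n6
-- ===== SOURCE A (Python) =====
-- def largest_square_n6(data, k):
--     best_sum, square_sum = 0, 0
--     n, m = len(data), len(data[0])
--     for left in range(n):
--         for right in range(n):
--             for top in range(m):
--                 for bottom in range(m):
--                     if is_square(left, right, top, bottom):
--                         current_sum = compute_sum(data, left, right, top, bottom)
--                         if k >= current_sum > best_sum:
--                             best_sum = current_sum
--     return best_sum
--
-- def is_square(left, right, top, bottom):
--     return right - left == bottom - top and right - left > 0
--
-- def compute_sum(data, left, right, top, bottom):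
--     current_sum = 0
--     for i in range(left, right + 1):
--         for j in range(top, bottom + 1):
--             current_sum += data[i][j]  # That is actually [row][column]
--     return current_sum
-- ===== SOURCE B (Python) =====
-- def largest_square_n6(data, k):
--     n, m = len(data), len(data[0])
--     pre = [_prefix_row(row, m) for row in data]
--     best = 0
--     for s in range(2, min(n, m) + 1):
--         for i in range(n - s + 1):
--             for j in range(m - s + 1):
--                 cur = 0
--                 for t in range(i, i + s):
--                     cur += pre[t][j + s] - pre[t][j]
--                 if k >= cur > best:
--                     best = cur
--     return best
--
-- def _prefix_row(row, m):
--     p = [0]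
--     acc = 0
--     for j in range(m):
--         acc += row[j]
--         p.append(acc)
--     return p
-- ===== Notes on version B (the rewrite author's own statement) =====
-- stated objective: faster
-- what changed: B precomputes per-row prefix sums once and enumerates squares by (side, row, col), getting each row-segment sum in O(1), instead of A's four nested corner loops with an is_square filter and a fresh O(s^2) rescan per square.
-- outside the precondition, e.g. on largest_square_n6([[5], []], 0): A returns 0, B raises IndexError
import Mathlib
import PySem

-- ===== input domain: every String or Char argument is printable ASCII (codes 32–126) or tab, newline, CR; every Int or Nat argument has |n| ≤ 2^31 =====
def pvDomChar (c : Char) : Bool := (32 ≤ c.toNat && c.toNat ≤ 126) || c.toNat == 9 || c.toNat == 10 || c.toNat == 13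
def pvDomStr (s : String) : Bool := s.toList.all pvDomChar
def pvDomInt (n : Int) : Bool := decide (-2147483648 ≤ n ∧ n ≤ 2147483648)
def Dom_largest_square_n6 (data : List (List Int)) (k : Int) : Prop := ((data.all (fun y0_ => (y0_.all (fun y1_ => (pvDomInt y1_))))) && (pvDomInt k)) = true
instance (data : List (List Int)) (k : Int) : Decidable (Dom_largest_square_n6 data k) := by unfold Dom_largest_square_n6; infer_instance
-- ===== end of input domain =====

-- B replaces A's four corner loops + O(s^2) rescan per square by per-row prefix sums and a
-- (side, row, col) enumeration with O(1) row-segment sums (objective: faster, asymptotic).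

-- ===== PORT A =====
def is_square (left right top bottom : Int) : Bool :=
  (right - left == bottom - top) && decide (right - left > 0)

def compute_sum (data : List (List Int)) (left right top bottom : Int) : Int :=
  (PySem.List.pyRange left (right + 1) 1).foldl (fun acc i =>
    (PySem.List.pyRange top (bottom + 1) 1).foldl (fun acc2 j =>
      acc2 + PySem.List.pyGetD (PySem.List.pyGetD data i []) j 0) acc) 0

def largest_square_n6 (data : List (List Int)) (k : Int) : Int :=
  let n : Int := data.length
  let m : Int := (PySem.List.pyGetD data 0 []).length
  (PySem.List.pyRange 0 n 1).foldl (fun b1 left =>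
    (PySem.List.pyRange 0 n 1).foldl (fun b2 right =>
      (PySem.List.pyRange 0 m 1).foldl (fun b3 top =>
        (PySem.List.pyRange 0 m 1).foldl (fun best bottom =>
          if is_square left right top bottom then
            let c := compute_sum data left right top bottom
            if k ≥ c ∧ c > best then c else best
          else best) b3) b2) b1) 0

-- ===== PORT B =====
def prefix_row (row : List Int) (m : Int) : List Int :=
  ((PySem.List.pyRange 0 m 1).foldl (fun (st : List Int × Int) j =>
    let acc := st.2 + PySem.List.pyGetD row j 0
    (st.1 ++ [acc], acc)) ([0], 0)).1

def largest_square_n6_alt (data : List (List Int)) (k : Int) : Int :=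
  let n : Int := data.length
  let m : Int := (PySem.List.pyGetD data 0 []).length
  let pre := data.map (fun row => prefix_row row m)
  (PySem.List.pyRange 2 (min n m + 1) 1).foldl (fun b1 s =>
    (PySem.List.pyRange 0 (n - s + 1) 1).foldl (fun b2 i =>
      (PySem.List.pyRange 0 (m - s + 1) 1).foldl (fun best j =>
        let c := (PySem.List.pyRange i (i + s) 1).foldl (fun acc t =>
          acc + (PySem.List.pyGetD (PySem.List.pyGetD pre t []) (j + s) 0
                 - PySem.List.pyGetD (PySem.List.pyGetD pre t []) j 0)) 0
        if k ≥ c ∧ c > best then c else best) b2) b1) 0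

-- ===== PRECONDITION & SPEC =====
-- Pre_ excludes the empty matrix (A raises IndexError on data[0]) and ragged inputs with a row
-- shorter than the first row: there A raises whenever any square reaches the short row, and on the
-- degenerate remainder (no square exists) B's prefix-sum pass raises where A accidentally returns 0.
def Pre_largest_square_n6 (data : List (List Int)) (k : Int) : Prop :=
  data ≠ [] ∧ ∀ row ∈ data, (PySem.List.pyGetD data 0 []).length ≤ row.length

instance (data : List (List Int)) (k : Int) : Decidable (Pre_largest_square_n6 data k) := by
  unfold Pre_largest_square_n6; infer_instance

def pvWitness_largest_square_n6 : List (List Int) × Int := ([[1, 2], [3, 4]], 10)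

def Spec_largest_square_n6 (data : List (List Int)) (k : Int) (out : Int) : Prop := out = largest_square_n6_alt data k
instance (data : List (List Int)) (k : Int) (out : Int) : Decidable (Spec_largest_square_n6 data k out) := by unfold Spec_largest_square_n6; infer_instance

-- ===== CLAIM (what is proved, stated in full; the proofs are below) =====
def Claim_equal_largest_square_n6 : Prop := ∀ (data : List (List Int)) (k : Int), Dom_largest_square_n6 data k → Pre_largest_square_n6 data k → Spec_largest_square_n6 data k (largest_square_n6 data k)

-- ===== LEMMAS AND PROOFS =====

-- the update step both programs apply to the running best
def upd (k best c : Int) : Int := if k ≥ c ∧ c > best then c else best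

-- sum of columns [j, j+s) of row t of data
def segSum (data : List (List Int)) (j s t : Int) : Int :=
  ((PySem.List.pyGetD data t []).take (j + s).toNat).sum
    - ((PySem.List.pyGetD data t []).take j.toNat).sum

-- sum of the s×s square with top-left corner (i, j)
def sqSum (data : List (List Int)) (i j s : Int) : Int :=
  (PySem.List.pyRange i (i + s) 1).foldl (fun acc t => acc + segSum data j s t) 0

-- the candidate sums A's four loops consider, in A's order
def candA (data : List (List Int)) : List Int :=
  (PySem.List.pyRange 0 data.length 1).flatMap fun l =>
    (PySem.List.pyRange 0 data.length 1).flatMap fun r =>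
      (PySem.List.pyRange 0 ((PySem.List.pyGetD data 0 []).length : Int) 1).flatMap fun t =>
        (PySem.List.pyRange 0 ((PySem.List.pyGetD data 0 []).length : Int) 1).filterMap fun b =>
          if is_square l r t b then some (compute_sum data l r t b) else none

-- B's per-square prefix-difference expression
def cB (data : List (List Int)) (m i j s : Int) : Int :=
  (PySem.List.pyRange i (i + s) 1).foldl (fun acc t =>
    acc + (PySem.List.pyGetD (PySem.List.pyGetD (data.map (fun row => prefix_row row m)) t []) (j + s) 0
           - PySem.List.pyGetD (PySem.List.pyGetD (data.map (fun row => prefix_row row m)) t []) j 0)) 0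

-- the candidate sums B's three loops consider, in B's order
def candB (data : List (List Int)) : List Int :=
  (PySem.List.pyRange 2 (min (data.length : Int) ((PySem.List.pyGetD data 0 []).length : Int) + 1) 1).flatMap fun s =>
    (PySem.List.pyRange 0 ((data.length : Int) - s + 1) 1).flatMap fun i =>
      (PySem.List.pyRange 0 (((PySem.List.pyGetD data 0 []).length : Int) - s + 1) 1).map fun j =>
        cB data ((PySem.List.pyGetD data 0 []).length : Int) i j s

lemma foldl_if_eq_filterMap (xs : List Int) (p : Int → Bool) (v : Int → Int)
    (f : Int → Int → Int) (b : Int) :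
    xs.foldl (fun acc x => if p x then f acc (v x) else acc) b
      = (xs.filterMap (fun x => if p x then some (v x) else none)).foldl f b := by
  rw [List.foldl_filterMap]
  apply PySem.List.foldl_congr_mem
  intro acc x _
  by_cases h : p x <;> simp [h]

lemma A_shape (data : List (List Int)) (k : Int) :
    largest_square_n6 data k = (candA data).foldl (upd k) 0 := by
  unfold largest_square_n6 candA
  simp only [List.foldl_flatMap, ← foldl_if_eq_filterMap]
  rfl

lemma B_shape (data : List (List Int)) (k : Int) :
    largest_square_n6_alt data k = (candB data).foldl (upd k) 0 := by
  unfold largest_square_n6_alt candB cB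
  simp only [List.foldl_flatMap, List.foldl_map]
  rfl

lemma foldl_upd_eq_max (k b : Int) (L : List Int) :
    L.foldl (upd k) b = (L.filter (fun c => decide (c ≤ k))).foldl max b := by
  rw [List.foldl_filter]
  apply PySem.List.foldl_congr_mem
  intro acc x _
  simp only [upd, max_def, decide_eq_true_eq]
  split_ifs <;> omega

lemma foldl_max_eq_of_mem_iff (L₁ L₂ : List Int) (b : Int)
    (h : ∀ x, x ∈ L₁ ↔ x ∈ L₂) : L₁.foldl max b = L₂.foldl max b := by
  apply le_antisymm
  · rcases PySem.List.foldl_max_mem L₁ b with h1 | h1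
    · rw [h1]; exact (PySem.List.le_foldl_max L₂ b).1
    · exact (PySem.List.le_foldl_max L₂ b).2 _ ((h _).mp h1)
  · rcases PySem.List.foldl_max_mem L₂ b with h1 | h1
    · rw [h1]; exact (PySem.List.le_foldl_max L₁ b).1
    · exact (PySem.List.le_foldl_max L₁ b).2 _ ((h _).mpr h1)

-- row-segment sum as a fold over its indices
lemma seg_fold (row : List Int) (j s acc : Int) (hj : 0 ≤ j) (hs : 0 ≤ s)
    (hb : j + s ≤ (row.length : Int)) :
    (PySem.List.pyRange j (j + s) 1).foldl (fun a q => a + PySem.List.pyGetD row q 0) acc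
      = acc + ((row.take (j + s).toNat).sum - (row.take j.toNat).sum) := by
  set tl := row.take (j + s).toNat with htl
  have h1 : (PySem.List.pyRange j (j+s) 1).foldl (fun a q => a + PySem.List.pyGetD row q 0) acc
      = (PySem.List.pyRange j (j+s) 1).foldl (fun a q => a + PySem.List.pyGetD tl q 0) acc := by
    apply PySem.List.foldl_congr_mem
    intro a q hq
    rw [PySem.List.mem_pyRange_one] at hq
    rw [PySem.List.pyGetD_eq_getElem row 0 (by omega) (by omega),
        PySem.List.pyGetD_eq_getElem tl 0 (by omega)
          (by rw [htl, List.length_take_of_le (by omega)]; omega)]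
    simp only [htl, List.getElem_take]
  rw [h1]
  have hlen : j + s = (tl.length : Int) := by
    rw [htl, List.length_take_of_le (by omega)]; omega
  rw [hlen, PySem.List.foldl_pyRange_pyGetD' tl 0 (fun a x => a + x) acc hj]
  have h4 : List.foldl (fun a x => a + x) acc (tl.drop j.toNat) = acc + (tl.drop j.toNat).sum := by
    simpa using PySem.List.foldl_add (tl.drop j.toNat) id acc
  rw [h4]
  have hsplit : row.take j.toNat ++ tl.drop j.toNat = tl := by
    have h2 : tl.take j.toNat = row.take j.toNat := by
      rw [htl, List.take_take]; congr 1; omega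
    rw [← h2, List.take_append_drop]
  have h3 := congrArg List.sum hsplit
  rw [List.sum_append] at h3
  omega

-- A's compute_sum over the square with corner (i,j) and side s is sqSum
lemma compute_sum_eq_sqSum (data : List (List Int)) (i j s : Int)
    (hm : ∀ row ∈ data, (PySem.List.pyGetD data 0 []).length ≤ row.length)
    (hi : 0 ≤ i) (hj : 0 ≤ j) (hs : 1 ≤ s)
    (hn : i + s ≤ (data.length : Int))
    (hmm : j + s ≤ ((PySem.List.pyGetD data 0 []).length : Int)) :
    compute_sum data i (i + s - 1) j (j + s - 1) = sqSum data i j s := by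
  unfold compute_sum sqSum
  have e1 : i + s - 1 + 1 = i + s := by ring
  have e2 : j + s - 1 + 1 = j + s := by ring
  rw [e1, e2]
  apply PySem.List.foldl_congr_mem
  intro acc t ht
  rw [PySem.List.mem_pyRange_one] at ht
  have htl : PySem.List.pyGetD data t [] = data[t.toNat] :=
    PySem.List.pyGetD_eq_getElem data [] (by omega) (by omega)
  have hmem : data[t.toNat]'(by omega) ∈ data := List.getElem_mem _
  have hc := hm _ hmem
  have hlen : j + s ≤ ((PySem.List.pyGetD data t []).length : Int) := by
    rw [htl]; omega
  rw [seg_fold _ j s acc hj (by omega) hlen]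
  rfl

lemma prefix_row_fold (row : List Int) (mN : Nat) (h : mN ≤ row.length) :
    (PySem.List.pyRange 0 (mN : Int) 1).foldl (fun (st : List Int × Int) j =>
      let acc := st.2 + PySem.List.pyGetD row j 0
      (st.1 ++ [acc], acc)) ([0], 0)
    = ((List.range (mN + 1)).map (fun q => (row.take q).sum), (row.take mN).sum) := by
  induction mN with
  | zero => simp [PySem.List.pyRange_one_eq_nil]
  | succ p ih =>
    have hcast : ((p + 1 : Nat) : Int) = (p : Int) + 1 := by push_cast; ring
    rw [hcast, PySem.List.pyRange_one_succ_right (by positivity), List.foldl_append,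
        ih (by omega)]
    simp only [List.foldl_cons, List.foldl_nil]
    have hget : PySem.List.pyGetD row (p : Int) 0 = row[p]'(by omega) := by
      rw [PySem.List.pyGetD_eq_getElem row 0 (by positivity) (by exact_mod_cast by omega)]
      simp
    rw [hget]
    have hsum : (row.take p).sum + row[p]'(by omega) = (row.take (p+1)).sum :=
      (List.sum_take_succ row p (by omega)).symm
    conv_rhs => rw [List.range_succ]
    rw [List.map_append, hsum]
    simp

lemma prefix_row_eq (row : List Int) (mN : Nat) (h : mN ≤ row.length) :
    prefix_row row (mN : Int) = (List.range (mN + 1)).map (fun q => (row.take q).sum) := by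
  unfold prefix_row
  rw [prefix_row_fold row mN h]

-- B's prefix-difference sum over the square with corner (i,j) and side s is sqSum
lemma cB_eq_sqSum (data : List (List Int)) (i j s : Int)
    (hm : ∀ row ∈ data, (PySem.List.pyGetD data 0 []).length ≤ row.length)
    (hi : 0 ≤ i) (hj : 0 ≤ j) (hs : 1 ≤ s)
    (hn : i + s ≤ (data.length : Int))
    (hmm : j + s ≤ ((PySem.List.pyGetD data 0 []).length : Int)) :
    cB data ((PySem.List.pyGetD data 0 []).length : Int) i j s = sqSum data i j s := by
  unfold cB sqSum
  apply PySem.List.foldl_congr_mem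
  intro acc t ht
  rw [PySem.List.mem_pyRange_one] at ht
  have htn : t.toNat < data.length := by omega
  have hrow : PySem.List.pyGetD data t [] = data[t.toNat] :=
    PySem.List.pyGetD_eq_getElem data [] (by omega) (by omega)
  have hpre : PySem.List.pyGetD
      (data.map (fun row => prefix_row row ((PySem.List.pyGetD data 0 []).length : Int))) t []
      = prefix_row (data[t.toNat]) ((PySem.List.pyGetD data 0 []).length : Int) := by
    rw [PySem.List.pyGetD_eq_getElem _ [] (by omega) (by simp; omega)]
    simp
  have hc := hm _ (List.getElem_mem htn)
  rw [hpre, prefix_row_eq _ _ hc]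
  have g1 : PySem.List.pyGetD
      ((List.range ((PySem.List.pyGetD data 0 []).length + 1)).map fun q => ((data[t.toNat]).take q).sum) (j + s) 0
      = ((data[t.toNat]).take (j + s).toNat).sum := by
    rw [PySem.List.pyGetD_of_nonneg _ _ (by omega),
        PySem.List.getD_map_range _ _ _ 0 (by omega)]
  have g2 : PySem.List.pyGetD
      ((List.range ((PySem.List.pyGetD data 0 []).length + 1)).map fun q => ((data[t.toNat]).take q).sum) j 0
      = ((data[t.toNat]).take j.toNat).sum := by
    rw [PySem.List.pyGetD_of_nonneg _ _ (by omega),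
        PySem.List.getD_map_range _ _ _ 0 (by omega)]
  rw [g1, g2]
  unfold segSum
  rw [hrow]

lemma cand_mem_iff (data : List (List Int))
    (hm : ∀ row ∈ data, (PySem.List.pyGetD data 0 []).length ≤ row.length) :
    ∀ x, x ∈ candA data ↔ x ∈ candB data := by
  intro x
  unfold candA candB
  simp only [List.mem_flatMap, List.mem_filterMap, List.mem_map, PySem.List.mem_pyRange_one]
  constructor
  · rintro ⟨l, ⟨hl0, hln⟩, r, ⟨hr0, hrn⟩, t, ⟨ht0, htm⟩, b, ⟨hb0, hbm⟩, hx⟩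
    by_cases hsq : is_square l r t b
    swap
    · simp [hsq] at hx
    rw [if_pos hsq, Option.some_inj] at hx
    unfold is_square at hsq
    simp only [Bool.and_eq_true, beq_iff_eq, decide_eq_true_eq] at hsq
    obtain ⟨heq, hpos⟩ := hsq
    refine ⟨r - l + 1, ⟨by omega, by omega⟩, l, ⟨hl0, by omega⟩, t, ⟨ht0, by omega⟩, ?_⟩
    rw [cB_eq_sqSum data l t (r - l + 1) hm hl0 ht0 (by omega) (by omega) (by omega), ← hx]
    have h2 := compute_sum_eq_sqSum data l t (r - l + 1) hm hl0 ht0 (by omega) (by omega) (by omega)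
    rw [show l + (r - l + 1) - 1 = r by ring, show t + (r - l + 1) - 1 = b by omega] at h2
    exact h2.symm
  · rintro ⟨s, ⟨hs2, hsm⟩, i, ⟨hi0, hin⟩, jj, ⟨hj0, hjm⟩, hx⟩
    refine ⟨i, ⟨hi0, by omega⟩, i + s - 1, ⟨by omega, by omega⟩, jj, ⟨hj0, by omega⟩,
      jj + s - 1, ⟨by omega, by omega⟩, ?_⟩
    have hsq : is_square i (i + s - 1) jj (jj + s - 1) = true := by
      unfold is_square
      simp only [Bool.and_eq_true, beq_iff_eq, decide_eq_true_eq]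
      omega
    rw [if_pos hsq, Option.some_inj,
        compute_sum_eq_sqSum data i jj s hm hi0 hj0 (by omega) (by omega) (by omega), ← hx,
        cB_eq_sqSum data i jj s hm hi0 hj0 (by omega) (by omega) (by omega)]

-- ===== VERDICT (by name: the statement is the Claim_ definition above) =====
theorem largest_square_n6_spec : Claim_equal_largest_square_n6 := by
  intro data k _ hpre
  unfold Spec_largest_square_n6
  rw [A_shape, B_shape, foldl_upd_eq_max, foldl_upd_eq_max]
  apply foldl_max_eq_of_mem_iff
  intro x
  simp only [List.mem_filter]
  rw [cand_mem_iff data hpre.2]
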